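-- pv_equiv track=rewrite | github.com/cmbi/kmad-web | kman_web/services/convert.py | add_elements_to_dict
-- ===== SOURCE A (Python) =====
-- import string
--
-- def create_numbering():
--     alphabet = list(string.ascii_lowercase) \
--         + list(string.ascii_uppercase) \
--         + [str(i) for i in range(0, 10)]
--     alphabet.remove('A')
--     numbering = []
--     for i in alphabet:
--         for j in alphabet:
--             numbering += [i+j]
--     return numbering
--
-- def add_elements_to_dict(newList, oldDict, dictkind):
--     newDict = oldDict
--     numbering = create_numbering()
--     for i, elI in enumerate(newList):
--         if len(elI) > 0:
--             elID = elI.split('.')[0] if dictkind == "domains" else elI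
--             if elID not in newDict.keys():
--                 index = len(newDict.keys())
--                 encoded_index = numbering[index]
--                 newDict[elID] = encoded_index
--     return newDict
-- ===== SOURCE B (Python) =====
-- import string
--
-- # 61-character alphabet: lowercase + uppercase + digits, with 'A' removed.
-- _ALPHA = [c for c in string.ascii_lowercase + string.ascii_uppercase + string.digits if c != 'A']
--
--
-- def add_elements_to_dict(newList, oldDict, dictkind):
--     newDict = oldDict
--     count = len(newDict)
--     for elI in newList:
--         if len(elI) > 0:
--             elID = elI.split('.')[0] if dictkind == "domains" else elI
--             if elID not in newDict:
--                 newDict[elID] = _ALPHA[count // 61] + _ALPHA[count % 61]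
--                 count += 1
--     return newDict
-- ===== Notes on version B (the rewrite author's own statement) =====
-- stated objective: simpler
-- what changed: B deletes the create_numbering helper that builds the full 3721-entry code table with nested loops and instead computes each new key's code directly as _ALPHA[count // 61] + _ALPHA[count % 61] (base-61 digits) from a running key count.
import Mathlib
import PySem

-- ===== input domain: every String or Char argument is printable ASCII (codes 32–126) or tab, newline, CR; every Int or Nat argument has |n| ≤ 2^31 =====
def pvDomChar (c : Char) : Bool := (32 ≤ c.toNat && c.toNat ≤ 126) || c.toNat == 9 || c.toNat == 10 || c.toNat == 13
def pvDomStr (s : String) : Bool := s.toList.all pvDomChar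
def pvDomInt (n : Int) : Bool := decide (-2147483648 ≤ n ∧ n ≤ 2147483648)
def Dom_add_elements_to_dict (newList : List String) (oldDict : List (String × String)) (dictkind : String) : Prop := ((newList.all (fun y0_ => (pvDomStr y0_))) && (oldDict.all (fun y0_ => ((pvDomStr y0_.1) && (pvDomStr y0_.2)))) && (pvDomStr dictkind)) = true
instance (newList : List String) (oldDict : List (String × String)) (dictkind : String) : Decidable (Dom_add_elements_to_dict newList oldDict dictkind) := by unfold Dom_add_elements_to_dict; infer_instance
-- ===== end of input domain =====

-- B drops A's precomputed 3721-entry code table and computes each code in closed form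
-- (base-61 digits count // 61 and count % 61 over the 61-letter alphabet, with a running key count);
-- like A, B mutates oldDict in place (newDict aliases oldDict), the claim is about the return value.

-- ===== PORT A =====
-- alphabet = list(lowercase) + list(uppercase) + [str(i) for i in range(0, 10)]; alphabet.remove('A')
def pvAlphabetA : List String :=
  let alphabet :=
    ("abcdefghijklmnopqrstuvwxyz".toList.map (fun c => String.ofList [c]))
    ++ ("ABCDEFGHIJKLMNOPQRSTUVWXYZ".toList.map (fun c => String.ofList [c]))
    ++ ((PySem.List.pyRange 0 10 1).map PySem.Int.toStr)
  (PySem.List.remove? alphabet "A").getD alphabet  -- 'A' is present, so remove? is some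

def create_numbering : List String :=
  pvAlphabetA.foldl (fun numbering i =>
    pvAlphabetA.foldl (fun numbering j => numbering ++ [i ++ j]) numbering) []

-- loop body of A (p = one element of enumerate(newList); only p.2 is used, as in the Python)
def pvStepA (numbering : List String) (dictkind : String)
    (d : PySem.Dict String String) (p : Int × String) : PySem.Dict String String :=
  let elI := p.2
  if PySem.Str.len elI > 0 then
    let elID := if dictkind == "domains"
      then (PySem.List.pyGet? ((PySem.Str.split? elI ".").getD []) 0).getD ""  -- split('.') is nonempty, sep ≠ ""
      else elI
    if d.keys.contains elID = false then
      let index : Int := (d.keys.length : Int)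
      let encoded := (PySem.List.pyGet? numbering index).getD ""  -- none = IndexError, excluded by Pre_
      d.insert elID encoded
    else d
  else d

def add_elements_to_dict (newList : List String) (oldDict : List (String × String)) (dictkind : String) : List (String × String) :=
  let newDict : PySem.Dict String String := PySem.Dict.mk oldDict
  let numbering := create_numbering
  ((PySem.List.enumerate newList 0).foldl (pvStepA numbering dictkind) newDict).items

-- ===== PORT B =====
-- _ALPHA = [c for c in lowercase + uppercase + digits if c != 'A']  (61 one-character strings)
def pvAlpha : List String :=
  (("abcdefghijklmnopqrstuvwxyz" ++ "ABCDEFGHIJKLMNOPQRSTUVWXYZ" ++ "0123456789").toList.filter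
    (fun c => c != 'A')).map (fun c => String.ofList [c])

-- loop body of B (state = (newDict, count))
def pvStepB (dictkind : String)
    (st : PySem.Dict String String × Int) (elI : String) : PySem.Dict String String × Int :=
  if PySem.Str.len elI > 0 then
    let elID := if dictkind == "domains"
      then (PySem.List.pyGet? ((PySem.Str.split? elI ".").getD []) 0).getD ""
      else elI
    if st.1.contains elID = false then
      let encoded := (PySem.List.pyGet? pvAlpha (PySem.Int.floordiv st.2 61)).getD ""
        ++ (PySem.List.pyGet? pvAlpha (PySem.Int.mod st.2 61)).getD ""  -- none = IndexError, excluded by Pre_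
      (st.1.insert elID encoded, st.2 + 1)
    else st
  else st

def add_elements_to_dict_alt (newList : List String) (oldDict : List (String × String)) (dictkind : String) : List (String × String) :=
  let newDict : PySem.Dict String String := PySem.Dict.mk oldDict
  (newList.foldl (pvStepB dictkind) (newDict, (newDict.size : Int))).1.items

-- ===== PRECONDITION & SPEC =====
-- the id each nonempty element of newList contributes (the same split expression as in both Pythons)
def pvIds (newList : List String) (dictkind : String) : List String :=
  newList.filterMap (fun e =>
    if PySem.Str.len e > 0 then
      some (if dictkind == "domains"
        then (PySem.List.pyGet? ((PySem.Str.split? e ".").getD []) 0).getD ""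
        else e)
    else none)

-- Pre_ excludes exactly the inputs whose final dict would need more than 3721 keys:
-- there Python A raises IndexError (numbering[3721]), and Python B raises IndexError at the same element.
def Pre_add_elements_to_dict (newList : List String) (oldDict : List (String × String)) (dictkind : String) : Prop :=
  oldDict.length + ((pvIds newList dictkind).toFinset \ (oldDict.map Prod.fst).toFinset).card ≤ 3721
instance (newList : List String) (oldDict : List (String × String)) (dictkind : String) : Decidable (Pre_add_elements_to_dict newList oldDict dictkind) := by unfold Pre_add_elements_to_dict; infer_instance

def pvWitness_add_elements_to_dict : List String × (List (String × String)) × String :=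
  (["abc.1", "", "xy", "abc.2"], [("xy", "aa")], "domains")

def Spec_add_elements_to_dict (newList : List String) (oldDict : List (String × String)) (dictkind : String) (out : List (String × String)) : Prop := out = add_elements_to_dict_alt newList oldDict dictkind
instance (newList : List String) (oldDict : List (String × String)) (dictkind : String) (out : List (String × String)) : Decidable (Spec_add_elements_to_dict newList oldDict dictkind out) := by unfold Spec_add_elements_to_dict; infer_instance

-- ===== CLAIM (what is proved, stated in full; the proofs are below) =====
def Claim_equal_add_elements_to_dict : Prop := ∀ (newList : List String) (oldDict : List (String × String)) (dictkind : String), Dom_add_elements_to_dict newList oldDict dictkind → Pre_add_elements_to_dict newList oldDict dictkind → Spec_add_elements_to_dict newList oldDict dictkind (add_elements_to_dict newList oldDict dictkind)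

-- ===== LEMMAS AND PROOFS =====

-- A's alphabet (after .remove('A')) is exactly B's _ALPHA
theorem pv_alphabetA_eq : pvAlphabetA = pvAlpha := by decide

theorem pvAlpha_length : pvAlpha.length = 61 := by decide

-- A's nested += loops build the flattened 61×61 concatenation table
theorem pv_outer (J : List String) (I : List String) : ∀ (acc : List String),
    I.foldl (fun numbering i => J.foldl (fun numbering j => numbering ++ [i ++ j]) numbering) acc
      = acc ++ I.flatMap (fun i => J.map (fun j => i ++ j)) := by
  induction I with
  | nil => simp
  | cons i I ih =>
    intro acc
    simp only [List.foldl_cons, List.flatMap_cons]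
    rw [PySem.List.foldl_append_singleton_eq_map (fun j => i ++ j) J acc, ih, List.append_assoc]

theorem create_numbering_eq :
    create_numbering = pvAlpha.flatMap (fun i => pvAlpha.map (fun j => i ++ j)) := by
  unfold create_numbering
  rw [pv_alphabetA_eq]
  simpa using pv_outer pvAlpha pvAlpha []

-- indexing the flattened table = the two base-61 digits
theorem flatMap_getElem? (I : List String) (n : Nat) :
    (I.flatMap (fun i => pvAlpha.map (fun j => i ++ j)))[n]? =
      (I[n / 61]?).bind (fun i => (pvAlpha[n % 61]?).map (fun j => i ++ j)) := by
  induction I generalizing n with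
  | nil => simp
  | cons i I ih =>
    have hlen : (pvAlpha.map (fun j => i ++ j)).length = 61 := by
      rw [List.length_map, pvAlpha_length]
    rw [List.flatMap_cons]
    by_cases h : n < 61
    · rw [List.getElem?_append_left (by omega)]
      have h0 : n / 61 = 0 := by omega
      have h1 : n % 61 = n := by omega
      rw [h0, h1, List.getElem?_map]
      simp [Option.bind]
    · rw [List.getElem?_append_right (by omega), hlen, ih]
      have h0 : n / 61 = (n - 61) / 61 + 1 := by omega
      have h1 : n % 61 = (n - 61) % 61 := by omega
      rw [h0, h1]
      simp

-- the value A reads from the table = the value B computes, at any in-range index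
theorem encoded_eq (n : Nat) (h : n < 3721) :
    (PySem.List.pyGet? create_numbering ((n : Nat) : Int)).getD "" =
      (PySem.List.pyGet? pvAlpha (PySem.Int.floordiv ((n : Nat) : Int) 61)).getD ""
        ++ (PySem.List.pyGet? pvAlpha (PySem.Int.mod ((n : Nat) : Int) 61)).getD "" := by
  rw [create_numbering_eq]
  have h61 : (61 : Int) = ((61 : Nat) : Int) := by norm_num
  rw [h61, PySem.Int.floordiv_natCast, PySem.Int.mod_natCast]
  rw [PySem.List.pyGet?_natCast, PySem.List.pyGet?_natCast, PySem.List.pyGet?_natCast]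
  rw [flatMap_getElem?]
  have hd : n / 61 < 61 := by omega
  have hm : n % 61 < 61 := by omega
  rw [List.getElem?_eq_getElem (by rw [pvAlpha_length]; exact hd),
      List.getElem?_eq_getElem (by rw [pvAlpha_length]; exact hm)]
  simp

-- A's loop ignores the enumerate index
theorem foldl_stepA_enumerate (numbering : List String) (dictkind : String) (L : List String) :
    ∀ (s : Int) (d : PySem.Dict String String),
      (PySem.List.enumerate L s).foldl (pvStepA numbering dictkind) d =
        L.foldl (fun d e => pvStepA numbering dictkind d (0, e)) d := by
  induction L with
  | nil => intro s d; simp [PySem.List.enumerate]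
  | cons x L ih =>
    intro s d
    rw [PySem.List.enumerate_cons, List.foldl_cons, List.foldl_cons, ih]
    rfl

-- 'elID not in newDict' (B) = 'elID not in newDict.keys()' (A)
theorem contains_eq_keys_contains (d : PySem.Dict String String) (k : String) :
    d.contains k = d.keys.contains k := by
  by_cases h : d.contains k = true
  · rw [h]; symm
    rw [List.contains_iff_mem]
    exact (PySem.Dict.contains_iff_mem_keys d k).mp h
  · rw [eq_false_of_ne_true h]; symm
    rw [Bool.eq_false_iff, ne_eq, List.contains_iff_mem]
    intro hm
    exact h ((PySem.Dict.contains_iff_mem_keys d k).mpr hm)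

theorem pv_keys_length (d : PySem.Dict String String) : d.keys.length = d.items.length := by
  simp [PySem.Dict.keys]

theorem pv_card_insert_sdiff (E : String) (T K : Finset String) (hEK : E ∉ K) :
    (insert E T \ K).card = (T \ insert E K).card + 1 := by
  have h1 : insert E T \ K = insert E (T \ K) := by
    ext x; by_cases hx : x = E <;> simp [hx, hEK]
  rw [Finset.sdiff_insert, h1]
  by_cases h : E ∈ T \ K
  · have hp : 0 < (T \ K).card := Finset.card_pos.mpr ⟨E, h⟩
    rw [Finset.insert_eq_self.mpr h, Finset.card_erase_of_mem h]
    omega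
  · rw [Finset.card_insert_of_notMem h, Finset.erase_eq_of_notMem h]

-- the loop invariant: B's count is the current number of items, the two dicts stay equal,
-- and the remaining fresh ids keep every insertion index below 3721
theorem main_invariant (dictkind : String) (L : List String) :
    ∀ (d : PySem.Dict String String),
      d.items.length + ((pvIds L dictkind).toFinset \ d.keys.toFinset).card ≤ 3721 →
      L.foldl (fun d' e => pvStepA create_numbering dictkind d' (0, e)) d =
          (L.foldl (pvStepB dictkind) (d, (d.items.length : Int))).1 ∧
        (L.foldl (pvStepB dictkind) (d, (d.items.length : Int))).2 =
          ((L.foldl (pvStepB dictkind) (d, (d.items.length : Int))).1.items.length : Int) := by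
  induction L with
  | nil => intro d _; exact ⟨rfl, rfl⟩
  | cons e L ih =>
    intro d hbud
    simp only [List.foldl_cons]
    have hids : pvIds (e :: L) dictkind =
        (if PySem.Str.len e > 0 then
          (if dictkind == "domains"
            then (PySem.List.pyGet? ((PySem.Str.split? e ".").getD []) 0).getD ""
            else e) :: pvIds L dictkind
        else pvIds L dictkind) := by
      simp only [pvIds, List.filterMap_cons]
      by_cases h0 : 0 < e.length <;> simp [h0]
    by_cases hlen : PySem.Str.len e > 0
    · rw [if_pos hlen] at hids
      set E := (if dictkind == "domains"
          then (PySem.List.pyGet? ((PySem.Str.split? e ".").getD []) 0).getD ""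
          else e) with hEdef
      by_cases hc : d.keys.contains E = false
      · -- fresh key: both insert, and the codes agree
        have hcB : d.contains E = false := by rw [contains_eq_keys_contains]; exact hc
        have hEnotK : E ∉ d.keys.toFinset := by
          simp only [List.mem_toFinset]
          simpa using hc
        have hEin : E ∈ (pvIds (e :: L) dictkind).toFinset \ d.keys.toFinset := by
          rw [Finset.mem_sdiff, hids, List.toFinset_cons]
          exact ⟨Finset.mem_insert_self _ _, hEnotK⟩
        have hcard1 : 1 ≤ ((pvIds (e :: L) dictkind).toFinset \ d.keys.toFinset).card :=
          Finset.card_pos.mpr ⟨E, hEin⟩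
        have hlt : d.items.length < 3721 := by omega
        have henc : (PySem.List.pyGet? create_numbering ((d.keys.length : Nat) : Int)).getD "" =
            (PySem.List.pyGet? pvAlpha (PySem.Int.floordiv ((d.items.length : Nat) : Int) 61)).getD ""
              ++ (PySem.List.pyGet? pvAlpha (PySem.Int.mod ((d.items.length : Nat) : Int) 61)).getD "" := by
          rw [pv_keys_length]; exact encoded_eq d.items.length hlt
        have hstepA : pvStepA create_numbering dictkind d (0, e) =
            d.insert E ((PySem.List.pyGet? pvAlpha (PySem.Int.floordiv ((d.items.length : Nat) : Int) 61)).getD ""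
              ++ (PySem.List.pyGet? pvAlpha (PySem.Int.mod ((d.items.length : Nat) : Int) 61)).getD "") := by
          simp only [pvStepA, ← hEdef, if_pos hlen, if_pos hc]
          rw [henc]
        have hstepB : pvStepB dictkind (d, (d.items.length : Int)) e =
            (d.insert E ((PySem.List.pyGet? pvAlpha (PySem.Int.floordiv ((d.items.length : Nat) : Int) 61)).getD ""
              ++ (PySem.List.pyGet? pvAlpha (PySem.Int.mod ((d.items.length : Nat) : Int) 61)).getD ""),
             (d.items.length : Int) + 1) := by
          simp only [pvStepB, ← hEdef, if_pos hlen, hcB]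
          simp
        rw [hstepA, hstepB]
        set enc := (PySem.List.pyGet? pvAlpha (PySem.Int.floordiv ((d.items.length : Nat) : Int) 61)).getD ""
              ++ (PySem.List.pyGet? pvAlpha (PySem.Int.mod ((d.items.length : Nat) : Int) 61)).getD "" with hencdef
        have hitems : (d.insert E enc).items = d.items ++ [(E, enc)] :=
          PySem.Dict.items_insert_of_not_contains d enc hcB
        have hlen' : (d.insert E enc).items.length = d.items.length + 1 := by
          rw [hitems, List.length_append, List.length_singleton]
        have hkeys' : (d.insert E enc).keys = d.keys ++ [E] :=
          PySem.Dict.keys_insert_of_not_contains d enc hcB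
        have hkeysF : (d.insert E enc).keys.toFinset = insert E d.keys.toFinset := by
          rw [hkeys', List.toFinset_append]
          simp
        have hbud' : (d.insert E enc).items.length +
            ((pvIds L dictkind).toFinset \ (d.insert E enc).keys.toFinset).card ≤ 3721 := by
          rw [hlen', hkeysF]
          rw [hids, List.toFinset_cons] at hbud
          have := pv_card_insert_sdiff E (pvIds L dictkind).toFinset d.keys.toFinset hEnotK
          omega
        have hcast : ((d.items.length : Int) + 1) = ((d.insert E enc).items.length : Int) := by
          rw [hlen']; push_cast; ring
        rw [hcast]
        exact ih (d.insert E enc) hbud'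
      · -- already present: both leave the state unchanged
        have hcB : ¬ d.contains E = false := by rw [contains_eq_keys_contains]; exact hc
        have hstepA : pvStepA create_numbering dictkind d (0, e) = d := by
          simp only [pvStepA, ← hEdef, if_pos hlen, if_neg hc]
        have hstepB : pvStepB dictkind (d, (d.items.length : Int)) e = (d, (d.items.length : Int)) := by
          simp only [pvStepB, ← hEdef, if_pos hlen, if_neg hcB]
        rw [hstepA, hstepB]
        apply ih
        refine le_trans (Nat.add_le_add_left (Finset.card_le_card ?_) _) hbud
        refine Finset.sdiff_subset_sdiff ?_ (Finset.Subset.refl _)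
        rw [hids, List.toFinset_cons]
        exact Finset.subset_insert _ _
    · -- empty element: skipped by both
      rw [if_neg hlen] at hids
      have hstepA : pvStepA create_numbering dictkind d (0, e) = d := by
        simp only [pvStepA, if_neg hlen]
      have hstepB : pvStepB dictkind (d, (d.items.length : Int)) e = (d, (d.items.length : Int)) := by
        simp only [pvStepB, if_neg hlen]
      rw [hstepA, hstepB]
      exact ih d (by rw [← hids]; exact hbud)

-- ===== VERDICT (by name: the statement is the Claim_ definition above) =====
theorem add_elements_to_dict_spec : Claim_equal_add_elements_to_dict := by
  intro newList oldDict dictkind _ hpre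
  unfold Spec_add_elements_to_dict
  show ((PySem.List.enumerate newList 0).foldl (pvStepA create_numbering dictkind) (PySem.Dict.mk oldDict)).items
      = ((newList.foldl (pvStepB dictkind)
          (PySem.Dict.mk oldDict, ((PySem.Dict.mk oldDict : PySem.Dict String String).size : Int))).1).items
  rw [foldl_stepA_enumerate]
  have hsz : ((PySem.Dict.mk oldDict : PySem.Dict String String).size : Int) =
      (((PySem.Dict.mk oldDict : PySem.Dict String String).items.length : Nat) : Int) := rfl
  rw [hsz]
  have hbud : (PySem.Dict.mk oldDict : PySem.Dict String String).items.length +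
      ((pvIds newList dictkind).toFinset \ (PySem.Dict.mk oldDict : PySem.Dict String String).keys.toFinset).card ≤ 3721 := by
    have hk : (PySem.Dict.mk oldDict : PySem.Dict String String).keys = oldDict.map Prod.fst := by
      simp [PySem.Dict.keys]
    rw [hk]
    exact hpre
  exact ((main_invariant dictkind newList (PySem.Dict.mk oldDict) hbud).1 ▸ rfl)
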